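-- pv_equiv track=rewrite | github.com/1200park/Algorithm | 프로그래머스/0/181837. 커피 심부름/커피 심부름.py | solution
-- ===== SOURCE A (Python) =====
-- def solution(order):
--     answer = 0
--     for idx in order:
--         if 'cafelatte' in idx:
--             answer += 5000
--         else:
--             answer += 4500
--     return answer
-- ===== SOURCE B (Python) =====
-- def solution(order):
--     # Divide and conquer: total price of a list is the sum of the prices of its halves.
--     n = len(order)
--     if n == 0:
--         return 0
--     if n == 1:
--         return 5000 if 'cafelatte' in order[0] else 4500
--     mid = n // 2
--     return solution(order[:mid]) + solution(order[mid:])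
-- ===== Notes on version B (the rewrite author's own statement) =====
-- stated objective: alternative
-- what changed: Replaced the per-item branching accumulator loop with a divide-and-conquer recursion: split the order list in half, price each half recursively, and add the two subtotals; single orders are priced directly.
import Mathlib
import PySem

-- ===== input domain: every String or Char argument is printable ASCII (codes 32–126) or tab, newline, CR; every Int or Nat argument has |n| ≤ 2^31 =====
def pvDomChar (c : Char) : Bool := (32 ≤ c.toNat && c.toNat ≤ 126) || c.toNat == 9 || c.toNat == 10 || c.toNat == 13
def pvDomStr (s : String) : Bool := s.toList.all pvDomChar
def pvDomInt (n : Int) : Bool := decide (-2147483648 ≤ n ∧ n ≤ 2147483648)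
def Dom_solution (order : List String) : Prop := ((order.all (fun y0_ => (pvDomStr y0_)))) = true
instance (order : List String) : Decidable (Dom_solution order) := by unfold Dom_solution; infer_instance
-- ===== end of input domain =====

-- B prices the order list by divide and conquer (sum of the two halves' subtotals) instead of A's per-item branching accumulator loop (objective: alternative).

-- ===== PORT A =====
def solution (order : List String) : Int :=
  order.foldl (fun answer idx =>
    if PySem.Str.isIn "cafelatte" idx then answer + 5000 else answer + 4500) 0

-- ===== PORT B =====
def solution_alt (order : List String) : Int :=
  match order with
  | [] => 0
  | [x] => if PySem.Str.isIn "cafelatte" x then 5000 else 4500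
  | x :: y :: rest =>
    let l := x :: y :: rest
    let mid := l.length / 2
    solution_alt (l.take mid) + solution_alt (l.drop mid)
termination_by order.length
decreasing_by
  · simp only [List.length_take, List.length_cons]; omega
  · simp only [List.length_drop, List.length_cons]; omega

-- ===== PRECONDITION & SPEC =====
def Spec_solution (order : List String) (out : Int) : Prop := out = solution_alt order
instance (order : List String) (out : Int) : Decidable (Spec_solution order out) := by unfold Spec_solution; infer_instance

-- ===== CLAIM (what is proved, stated in full; the proofs are below) =====
def Claim_equal_solution : Prop := ∀ (order : List String), Dom_solution order → Spec_solution order (solution order)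

-- ===== LEMMAS AND PROOFS =====
def pvPrice (x : String) : Int := if PySem.Str.isIn "cafelatte" x then 5000 else 4500

theorem solution_alt_eq_sum (order : List String) :
    solution_alt order = (order.map pvPrice).sum := by
  induction order using solution_alt.induct with
  | case1 => simp [solution_alt]
  | case2 x _ => simp [solution_alt, pvPrice]
  | case3 x _ => simp [solution_alt, pvPrice]
  | case4 x y rest l mid ih1 ih2 =>
    rw [solution_alt]
    rw [ih1, ih2, ← List.sum_append, ← List.map_append, List.take_append_drop]

theorem solution_foldl_shift (order : List String) (a : Int) :
    order.foldl (fun answer idx =>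
      if PySem.Str.isIn "cafelatte" idx then answer + 5000 else answer + 4500) a
    = a + (order.map pvPrice).sum := by
  induction order generalizing a with
  | nil => simp
  | cons h t ih =>
    simp only [List.foldl_cons, List.map_cons, List.sum_cons, ih, pvPrice]
    split_ifs <;> ring

-- ===== VERDICT (by name: the statement is the Claim_ definition above) =====
theorem solution_spec : Claim_equal_solution := by
  intro order _
  unfold Spec_solution solution
  rw [solution_foldl_shift, solution_alt_eq_sum, zero_add]
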